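-- pv_equiv track=rewrite | github.com/wanshoupu/quantum-simulations | quompiler/utils/gray.py | differ_bits
-- ===== SOURCE A (Python) =====
-- from typing import Tuple, List
--
-- def differ_bits(ns: Tuple[int, int], ms: Tuple[int, int]) -> List[int]:
--     """
--     Find any index of bit where the numbers in each of ns and ms differ on this bit.
--     For example, ns = (5,6), ms = (7,0), the parity bit is 0.
--     Note we adopt the Little endian convention the least significant bit has index zero.
--     :param ns:
--     :param ms:
--     :return: index of the parity bit. If no such bit exists, return None
--     """
--     bitlength = max(ns + ms).bit_length()
--     result = []
--     for i in range(bitlength):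
--         mask = 1 << i
--         if len({ns[0] & mask, ns[1] & mask, ms[0] & mask, ms[1] & mask}) > 1:
--             result.append(i)
--     return result
-- ===== SOURCE B (Python) =====
-- def differ_bits(ns, ms):
--     a, b = ns
--     c, d = ms
--     diff = (a | b | c | d) ^ (a & b & c & d)
--     diff &= (1 << max(a, b, c, d).bit_length()) - 1
--     result = []
--     i = 0
--     while diff:
--         if diff & 1:
--             result.append(i)
--         diff >>= 1
--         i += 1
--     return result
-- ===== Notes on version B (the rewrite author's own statement) =====
-- stated objective: alternative
-- what changed: Instead of masking each of the four numbers at every bit index and counting distinct masked values in a set, B builds one combined difference word (or of the four) XOR (and of the four), masks it to the bit length, and scans its set bits with a single shift loop.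
import Mathlib
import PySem

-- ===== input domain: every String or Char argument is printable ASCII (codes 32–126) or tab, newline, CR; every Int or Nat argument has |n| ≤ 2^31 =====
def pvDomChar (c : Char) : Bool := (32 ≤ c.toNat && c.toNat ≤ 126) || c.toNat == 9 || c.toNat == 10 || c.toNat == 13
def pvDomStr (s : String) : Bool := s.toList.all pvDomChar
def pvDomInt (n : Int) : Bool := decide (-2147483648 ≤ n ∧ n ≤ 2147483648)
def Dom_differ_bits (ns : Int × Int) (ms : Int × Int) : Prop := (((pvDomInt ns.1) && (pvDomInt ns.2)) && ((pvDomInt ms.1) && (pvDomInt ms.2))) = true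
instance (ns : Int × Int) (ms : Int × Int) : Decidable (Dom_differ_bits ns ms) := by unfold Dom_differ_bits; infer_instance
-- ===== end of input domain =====

-- B replaces A's per-index masking of all four numbers (a 4-element set per bit) by one combined
-- difference word (or ^ and, masked to the bit length) scanned bit by bit (objective: alternative).
-- Int.land / Int.lor / Int.xor are Python's & | ^ (infinite two's complement), exact also on negatives;
-- int.bit_length() is PySem.Int.bitLength; <<< / >>> on Int are Python's << / >>.

-- ===== PORT A =====
def differ_bits (ns : Int × Int) (ms : Int × Int) : List Int :=
  let bitlength := PySem.Int.bitLength (max (max (max ns.1 ns.2) ms.1) ms.2)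
  (List.range bitlength).foldl (fun result i =>
    let mask : Int := (1 : Int) <<< ((i : Nat) : Int)
    if 1 < (PySem.Set.ofList [Int.land ns.1 mask, Int.land ns.2 mask,
                              Int.land ms.1 mask, Int.land ms.2 mask]).length
    then result ++ [(i : Int)] else result) []

-- ===== PORT B =====
-- Python's 'while diff:' — diff is nonnegative at every call in B (it was masked), so 'diff != 0' is 'diff > 0'.
def bitsLoop (d : Int) (i : Int) : List Int :=
  if h : d ≤ 0 then []
  else (if Int.land d 1 = 1 then [i] else []) ++ bitsLoop (d >>> (1 : Int)) (i + 1)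
  termination_by d.toNat
  decreasing_by
    rcases d with m | m
    · show ((Int.ofNat m >>> ((1 : Nat) : Int))).toNat < (Int.ofNat m).toNat
      rw [show Int.ofNat m = ((m : Nat) : Int) from rfl] at h ⊢
      rw [Int.shiftRight_natCast]
      simp only [Int.toNat_natCast, Nat.shiftRight_one]
      omega
    · exact absurd (by exact Int.negSucc_lt_zero m |>.le) h

def differ_bits_alt (ns : Int × Int) (ms : Int × Int) : List Int :=
  let a := ns.1
  let b := ns.2
  let c := ms.1
  let d := ms.2
  let diff := Int.xor (Int.lor (Int.lor (Int.lor a b) c) d)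
                      (Int.land (Int.land (Int.land a b) c) d)
  let diff2 := Int.land diff (((1 : Int) <<< ((PySem.Int.bitLength (max (max (max a b) c) d) : Nat) : Int)) - 1)
  bitsLoop diff2 0

-- ===== PRECONDITION & SPEC =====
def Spec_differ_bits (ns : Int × Int) (ms : Int × Int) (out : List Int) : Prop := out = differ_bits_alt ns ms
instance (ns : Int × Int) (ms : Int × Int) (out : List Int) : Decidable (Spec_differ_bits ns ms out) := by unfold Spec_differ_bits; infer_instance

-- ===== CLAIM (what is proved, stated in full; the proofs are below) =====
def Claim_equal_differ_bits : Prop := ∀ (ns : Int × Int) (ms : Int × Int), Dom_differ_bits ns ms → Spec_differ_bits ns ms (differ_bits ns ms)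

-- ===== LEMMAS AND PROOFS =====

-- a 4-element Python set literal has more than one element iff the values are not all equal
theorem set4_len_gt_one (p q r s : Int) :
    1 < (PySem.Set.ofList [p, q, r, s]).length ↔ ¬ (q = p ∧ r = p ∧ s = p) := by
  by_cases h1 : q = p <;> by_cases h2 : r = p <;> by_cases h3 : s = p <;>
    simp_all [PySem.Set.ofList, PySem.Set.add, PySem.Set.contains, List.contains_eq_mem] <;>
    split_ifs <;> simp_all

-- 1 << i on Int is the natural number 2^i
theorem shl_pow (i : Nat) : (1 : Int) <<< ((i : Nat) : Int) = ((2 ^ i : Nat) : Int) := by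
  rw [show (1 : Int) = ((1 : Nat) : Int) from rfl, Int.shiftLeft_natCast]
  norm_num [Nat.shiftLeft_eq]

-- x & (1 << i)  =  if bit i of x then 2^i else 0
theorem land_mask (x : Int) (i : Nat) :
    Int.land x ((1 : Int) <<< ((i : Nat) : Int)) = if x.testBit i then ((2 ^ i : Nat) : Int) else 0 := by
  rw [shl_pow]
  rcases x with m | m
  · rw [show Int.land (Int.ofNat m) ((2 ^ i : Nat) : Int) = (((m &&& 2 ^ i : Nat)) : Int) from rfl,
      Nat.and_two_pow, show (Int.ofNat m).testBit i = m.testBit i from rfl]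
    rcases h : m.testBit i with _ | _ <;> simp
  · rw [show Int.land (Int.negSucc m) ((2 ^ i : Nat) : Int) = ((Nat.ldiff (2 ^ i) m : Nat) : Int) from rfl,
      show (Int.negSucc m).testBit i = !(m.testBit i) from rfl]
    have hl : Nat.ldiff (2 ^ i) m = if m.testBit i then 0 else 2 ^ i := by
      apply Nat.eq_of_testBit_eq
      intro j
      rw [Nat.testBit_ldiff, Nat.testBit_two_pow]
      by_cases hij : i = j <;> rcases hb : m.testBit i with _ | _ <;> simp_all
    rw [hl]
    rcases hb : m.testBit i with _ | _ <;> simp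

-- the combined difference word has bit i set iff the four bits are not all equal
theorem diff_testBit (a b c d : Int) (i : Nat) :
    (Int.xor (Int.lor (Int.lor (Int.lor a b) c) d)
             (Int.land (Int.land (Int.land a b) c) d)).testBit i
      = ((((a.testBit i || b.testBit i) || c.testBit i) || d.testBit i)
        ^^ (((a.testBit i && b.testBit i) && c.testBit i) && d.testBit i)) := by
  rw [Int.testBit_lxor, Int.testBit_lor, Int.testBit_lor, Int.testBit_lor,
    Int.testBit_land, Int.testBit_land, Int.testBit_land]

-- masking with (1 << L) - 1 gives a natural number whose bits are the original's bits below L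
theorem land_mask_low (x : Int) (L : Nat) :
    ∃ m : Nat, Int.land x (((1 : Int) <<< ((L : Nat) : Int)) - 1) = ((m : Nat) : Int)
      ∧ (∀ j, m.testBit j = (x.testBit j && decide (j < L))) := by
  have h1 : ((1 : Int) <<< ((L : Nat) : Int)) - 1 = ((2 ^ L - 1 : Nat) : Int) := by
    rw [shl_pow]
    have h : 1 ≤ 2 ^ L := Nat.one_le_two_pow
    push_cast [h]
    ring
  rw [h1]
  rcases x with m | m
  · exact ⟨m &&& (2 ^ L - 1), rfl, fun j => by
      rw [Nat.testBit_and, Nat.testBit_two_pow_sub_one]; rfl⟩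
  · exact ⟨Nat.ldiff (2 ^ L - 1) m, rfl, fun j => by
      rw [Nat.testBit_ldiff, Nat.testBit_two_pow_sub_one,
        show (Int.negSucc m).testBit j = !(m.testBit j) from rfl, Bool.and_comm]⟩

-- the bit-scan loop lists the set-bit positions in ascending order
theorem bitsLoop_spec (L : Nat) :
    ∀ (m : Nat), m < 2 ^ L → ∀ (i : Int),
      bitsLoop ((m : Nat) : Int) i
        = ((List.range L).filter (fun j => m.testBit j)).map (fun (j : Nat) => i + (j : Int)) := by
  induction L with
  | zero =>
    intro m hm i
    have : m = 0 := by omega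
    subst this
    simp [bitsLoop]
  | succ L ih =>
    intro m hm i
    by_cases h0 : m = 0
    · subst h0
      simp [bitsLoop, Nat.zero_testBit]
    · have hneg : ¬ ((m : Nat) : Int) ≤ 0 := by
        have := Nat.pos_of_ne_zero h0; omega
      rw [bitsLoop, dif_neg hneg]
      have hland : Int.land ((m : Nat) : Int) 1 = ((m % 2 : Nat) : Int) := by
        rw [show Int.land ((m : Nat) : Int) 1 = ((m &&& 1 : Nat) : Int) from rfl, Nat.and_one_is_mod]
      have hshift : ((m : Nat) : Int) >>> (1 : Int) = (((m / 2 : Nat)) : Int) := by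
        rw [show (1 : Int) = ((1 : Nat) : Int) from rfl, Int.shiftRight_natCast, Nat.shiftRight_one]
      rw [hland, hshift, ih (m / 2) (by rw [pow_succ] at hm; omega) (i + 1)]
      rw [List.range_succ_eq_map, List.filter_cons, List.filter_map]
      have hc : ((fun j => m.testBit j) ∘ Nat.succ) = fun j => (m / 2).testBit j := by
        funext j; simp [Function.comp, Nat.testBit_succ]
      rw [hc]
      have htail :
          List.map (fun (j : Nat) => i + (j : Int))
              (List.map Nat.succ ((List.range L).filter (fun j => (m / 2).testBit j)))
            = List.map (fun (j : Nat) => (i + 1) + (j : Int))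
              ((List.range L).filter (fun j => (m / 2).testBit j)) := by
        rw [List.map_map]
        apply List.map_congr_left
        intro a _
        simp [Function.comp]
        ring
      by_cases hb : m % 2 = 1
      · have ht0 : m.testBit 0 = true := by simp [Nat.testBit_zero, hb]
        have hl1 : ((m % 2 : Nat) : Int) = 1 := by rw [hb]; rfl
        rw [if_pos hl1, if_pos ht0]
        simp [htail]
      · have ht0 : m.testBit 0 = false := by simp [Nat.testBit_zero]; omega
        have hl1 : ¬ ((m % 2 : Nat) : Int) = 1 := by
          intro hh; exact hb (by exact_mod_cast hh)
        rw [if_neg hl1, if_neg (by simp [ht0])]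
        simp [htail]

theorem differ_bits_eq (ns ms : Int × Int) : differ_bits ns ms = differ_bits_alt ns ms := by
  obtain ⟨a, b⟩ := ns
  obtain ⟨c, d⟩ := ms
  show
    (List.range (PySem.Int.bitLength (max (max (max a b) c) d))).foldl (fun result i =>
        if 1 < (PySem.Set.ofList [Int.land a ((1 : Int) <<< ((i : Nat) : Int)),
            Int.land b ((1 : Int) <<< ((i : Nat) : Int)),
            Int.land c ((1 : Int) <<< ((i : Nat) : Int)),
            Int.land d ((1 : Int) <<< ((i : Nat) : Int))]).length
        then result ++ [(i : Int)] else result) []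
      = bitsLoop (Int.land
          (Int.xor (Int.lor (Int.lor (Int.lor a b) c) d) (Int.land (Int.land (Int.land a b) c) d))
          (((1 : Int) <<< ((PySem.Int.bitLength (max (max (max a b) c) d) : Nat) : Int)) - 1)) 0
  set bl := PySem.Int.bitLength (max (max (max a b) c) d) with hbl
  set diff0 := Int.xor (Int.lor (Int.lor (Int.lor a b) c) d)
      (Int.land (Int.land (Int.land a b) c) d) with hdiff0
  -- A-side: the loop is a filter of the bit positions of diff0
  have hA :
      (List.range bl).foldl (fun result i =>
          if 1 < (PySem.Set.ofList [Int.land a ((1 : Int) <<< ((i : Nat) : Int)),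
              Int.land b ((1 : Int) <<< ((i : Nat) : Int)),
              Int.land c ((1 : Int) <<< ((i : Nat) : Int)),
              Int.land d ((1 : Int) <<< ((i : Nat) : Int))]).length
          then result ++ [(i : Int)] else result) []
        = ((List.range bl).filter (fun i => diff0.testBit i)).map (fun (i : Nat) => (i : Int)) := by
    have hcong := PySem.List.foldl_congr_mem (List.range bl)
      (fun result i =>
          if 1 < (PySem.Set.ofList [Int.land a ((1 : Int) <<< ((i : Nat) : Int)),
              Int.land b ((1 : Int) <<< ((i : Nat) : Int)),
              Int.land c ((1 : Int) <<< ((i : Nat) : Int)),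
              Int.land d ((1 : Int) <<< ((i : Nat) : Int))]).length
          then result ++ [(i : Int)] else result)
      (fun result i => if diff0.testBit i = true then result ++ [(i : Int)] else result)
      [] ?_
    · rw [hcong, PySem.List.foldl_append_if (fun i => diff0.testBit i) (fun (i : Nat) => (i : Int))]
      simp
    · intro acc i _
      apply if_congr ?_ rfl rfl
      rw [land_mask a i, land_mask b i, land_mask c i, land_mask d i,
        set4_len_gt_one, hdiff0, diff_testBit]
      have hp : ((2 ^ i : Nat) : Int) ≠ 0 := by positivity
      cases a.testBit i <;> cases b.testBit i <;> cases c.testBit i <;> cases d.testBit i <;>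
        simp_all <;> exact (by positivity : (0:ℤ) < 2 ^ i).ne
  rw [hA]
  -- B-side: the masked word is a natural number and the loop filters its bits
  obtain ⟨m, hmeq, hmbits⟩ := land_mask_low diff0 bl
  have hmlt : m < 2 ^ bl := by
    apply Nat.lt_pow_two_of_testBit
    intro i hi
    rw [hmbits i]
    simp [Nat.not_lt.mpr hi]
  rw [hmeq, bitsLoop_spec bl m hmlt 0]
  have hfilter : (List.range bl).filter (fun j => m.testBit j)
      = (List.range bl).filter (fun i => diff0.testBit i) := by
    apply List.filter_congr
    intro j hj
    rw [hmbits j]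
    simp [List.mem_range.mp hj]
  rw [hfilter]
  apply List.map_congr_left
  intro j _
  omega

-- ===== VERDICT (by name: the statement is the Claim_ definition above) =====
theorem differ_bits_spec : Claim_equal_differ_bits := by
  intro ns ms _
  show differ_bits ns ms = differ_bits_alt ns ms
  exact differ_bits_eq ns ms
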